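-- pv_equiv track=rewrite | github.com/fedexcastro/cs-training | problems.py | toptal1
-- ===== SOURCE A (Python) =====
-- def validate_integer(elem, min, max):
--     if not (isinstance(elem, int) and min <= elem <= max):
--         raise ValueError("Element is not a valid integer")
--
-- def toptal1(X, A):
--     validate_integer(X, 0, 100000)
--     validate_iterable(A, elem_type=int)
--     l = len(A)
--
--     def P(T):
--         validate_integer(l, 0, l)
--         return sum([1 for e in range(0, T) if A[e] == X])
--
--     def Q(T):
--         validate_integer(l, 0, l)
--         return sum([1 for e in range(0, T) if A[e] != X])
--
--     for index in range(1, l):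
--         if Q(index) == P(index):
--             return index
--     return -1
--
-- def validate_iterable(elem, elem_type=None):
--     try:
--         it = iter(elem)
--         if elem_type:
--             for e in it:
--                 if not isinstance(e, elem_type):
--                     raise ValueError
--     except (TypeError, ValueError):
--         return ValueError("Invalid input")
-- ===== SOURCE B (Python) =====
-- def toptal1(X, A):
--     if not (isinstance(X, int) and 0 <= X <= 100000):
--         raise ValueError("Element is not a valid integer")
--     eq = ne = 0
--     for index, a in enumerate(A[:-1], start=1):
--         if a == X:
--             eq += 1
--         else:
--             ne += 1
--         if eq == ne:
--             return index
--     return -1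
-- ===== Notes on version B (the rewrite author's own statement) =====
-- stated objective: faster
-- what changed: Replaces the per-index recount (a fresh pass over the prefix for both P and Q at every candidate index) with one pass that maintains running equal/not-equal counters and compares them at each step.
import Mathlib
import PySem

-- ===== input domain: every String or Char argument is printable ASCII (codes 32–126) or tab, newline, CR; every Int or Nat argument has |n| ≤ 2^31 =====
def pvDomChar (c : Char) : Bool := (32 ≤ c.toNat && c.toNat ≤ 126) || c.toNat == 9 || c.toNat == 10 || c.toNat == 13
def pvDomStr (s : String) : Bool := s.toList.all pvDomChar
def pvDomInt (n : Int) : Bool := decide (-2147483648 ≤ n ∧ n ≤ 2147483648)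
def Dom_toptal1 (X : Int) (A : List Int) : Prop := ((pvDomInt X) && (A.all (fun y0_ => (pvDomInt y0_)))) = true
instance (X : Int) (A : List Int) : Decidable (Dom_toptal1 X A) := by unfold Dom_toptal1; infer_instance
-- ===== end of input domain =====

-- B replaces A's quadratic per-index recount of the prefix with a single pass
-- keeping running equal/not-equal counters (objective: faster, O(n) vs O(n^2)).

-- ===== PORT A =====
-- P(T) = sum([1 for e in range(0, T) if A[e] == X]); indices e are always in
-- range when called from the loop below, so the pyGetD default is never read.
def pSum (X : Int) (A : List Int) (T : Int) : Int :=
  (((PySem.List.pyRange 0 T 1).filter (fun e => PySem.List.pyGetD A e 0 == X)).map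
    (fun _ => (1 : Int))).sum

-- Q(T) = sum([1 for e in range(0, T) if A[e] != X])
def qSum (X : Int) (A : List Int) (T : Int) : Int :=
  (((PySem.List.pyRange 0 T 1).filter (fun e => !(PySem.List.pyGetD A e 0 == X))).map
    (fun _ => (1 : Int))).sum

-- 'for index in range(1, l): if Q(index) == P(index): return index' / 'return -1'
def toptal1Loop (X : Int) (A : List Int) : List Int → Int
  | [] => -1
  | i :: rest => if qSum X A i = pSum X A i then i else toptal1Loop X A rest

-- validate_integer(X, 0, 100000) raises outside Pre_toptal1 (excluded there);
-- validate_iterable never raises (it returns the exception object).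
def toptal1 (X : Int) (A : List Int) : Int :=
  toptal1Loop X A (PySem.List.pyRange 1 (A.length : Int) 1)

-- ===== PORT B =====
-- 'for index, a in enumerate(A[:-1], start=1): …' with running counters eq, ne
def altGo (X : Int) : Int → Int → Int → List Int → Int
  | _, _, _, [] => -1
  | eq, ne, idx, a :: rest =>
    let eq' := if a = X then eq + 1 else eq
    let ne' := if a = X then ne else ne + 1
    if eq' = ne' then idx else altGo X eq' ne' (idx + 1) rest

def toptal1_alt (X : Int) (A : List Int) : Int :=
  altGo X 0 0 1 A.dropLast

-- ===== PRECONDITION & SPEC =====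
-- Python A raises ValueError unless 0 <= X <= 100000 (validate_integer); Pre_ is exactly that.
def Pre_toptal1 (X : Int) (A : List Int) : Prop := 0 ≤ X ∧ X ≤ 100000
instance (X : Int) (A : List Int) : Decidable (Pre_toptal1 X A) := by unfold Pre_toptal1; infer_instance
def pvWitness_toptal1 : Int × List Int := (1, [1, 2, 1, 3])

def Spec_toptal1 (X : Int) (A : List Int) (out : Int) : Prop := out = toptal1_alt X A
instance (X : Int) (A : List Int) (out : Int) : Decidable (Spec_toptal1 X A out) := by unfold Spec_toptal1; infer_instance

-- ===== CLAIM (what is proved, stated in full; the proofs are below) =====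
def Claim_equal_toptal1 : Prop := ∀ (X : Int) (A : List Int), Dom_toptal1 X A → Pre_toptal1 X A → Spec_toptal1 X A (toptal1 X A)

-- ===== LEMMAS AND PROOFS =====

-- one more index in the prefix adds A[k] to exactly one of the two counts
lemma pSum_succ (X : Int) (A : List Int) (k : Nat) (hk : k < A.length) :
    pSum X A ((k : Int) + 1) = pSum X A (k : Int) + (if A[k] = X then 1 else 0) := by
  unfold pSum
  rw [PySem.List.pyRange_one_succ_right (by exact_mod_cast Nat.zero_le k)]
  rw [List.filter_append, List.map_append, List.sum_append]
  simp only [List.filter_cons, List.filter_nil, PySem.List.pyGetD_natCast]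
  by_cases h : A[k] = X <;> simp [List.getElem?_eq_getElem hk, h]

lemma qSum_succ (X : Int) (A : List Int) (k : Nat) (hk : k < A.length) :
    qSum X A ((k : Int) + 1) = qSum X A (k : Int) + (if A[k] = X then 0 else 1) := by
  unfold qSum
  rw [PySem.List.pyRange_one_succ_right (by exact_mod_cast Nat.zero_le k)]
  rw [List.filter_append, List.map_append, List.sum_append]
  simp only [List.filter_cons, List.filter_nil, PySem.List.pyGetD_natCast]
  by_cases h : A[k] = X <;> simp [List.getElem?_eq_getElem hk, h]

-- loop invariant: A's remaining scan over indices [k, l) equals B's scan over the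
-- remaining suffix with counters holding the counts of the first k-1 elements
lemma loop_eq (X : Int) (A : List Int) :
    ∀ (suf : List Int) (k : Nat), 1 ≤ k → k + suf.length = A.length →
      suf = A.dropLast.drop (k - 1) →
      toptal1Loop X A (PySem.List.pyRange (k : Int) (A.length : Int) 1) =
        altGo X (pSum X A ((k : Int) - 1)) (qSum X A ((k : Int) - 1)) (k : Int) suf := by
  intro suf
  induction suf with
  | nil =>
    intro k hk hlen _
    simp at hlen
    subst hlen
    rw [PySem.List.pyRange_one_eq_nil (le_refl _)]
    rfl
  | cons a rest ih =>
    intro k hk hlen hsuf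
    have hkl : k < A.length := by simp at hlen; omega
    have hkd : k - 1 < A.dropLast.length := by
      rw [List.length_dropLast]; omega
    have hA : A[k - 1]'(by omega) = a := by
      have h0 := congrArg (fun l => l[0]?) hsuf
      simp only [List.getElem?_cons_zero, List.getElem?_drop, Nat.add_zero,
        List.getElem?_eq_getElem hkd, List.getElem_dropLast] at h0
      exact (Option.some.injEq _ _).mp h0.symm
    have hk1 : ((k - 1 : Nat) : Int) = (k : Int) - 1 := by omega
    have hk2 : ((k - 1 : Nat) : Int) + 1 = (k : Int) := by omega
    have hp := pSum_succ X A (k - 1) (by omega)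
    have hq := qSum_succ X A (k - 1) (by omega)
    rw [hk2, hk1, hA] at hp hq
    have hcast : ((k : Int) + 1) = ((k + 1 : Nat) : Int) := by push_cast; ring
    have hcast1 : ((k + 1 : Nat) : Int) - 1 = (k : Int) := by push_cast; ring
    have hrest : rest = A.dropLast.drop ((k + 1) - 1) := by
      have := congrArg List.tail hsuf
      simpa [List.tail_drop, Nat.sub_add_cancel hk] using this
    have hlen' : (k + 1) + rest.length = A.length := by simp at hlen ⊢; omega
    rw [PySem.List.pyRange_one_cons (by exact_mod_cast hkl)]
    simp only [toptal1Loop, altGo]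
    by_cases hax : a = X
    · simp only [hax, ite_true, add_zero] at hp hq ⊢
      rw [hp, hq]
      by_cases hcond : qSum X A ((k : Int) - 1) = pSum X A ((k : Int) - 1) + 1
      · rw [if_pos hcond, if_pos hcond.symm]
      · rw [if_neg hcond, if_neg (fun h => hcond h.symm)]
        rw [hcast, ih (k + 1) (by omega) hlen' hrest, hcast1, hp, hq]
    · simp only [if_neg hax, add_zero] at hp hq ⊢
      rw [hp, hq]
      by_cases hcond : qSum X A ((k : Int) - 1) + 1 = pSum X A ((k : Int) - 1)
      · rw [if_pos hcond, if_pos hcond.symm]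
      · rw [if_neg hcond, if_neg (fun h => hcond h.symm)]
        rw [hcast, ih (k + 1) (by omega) hlen' hrest, hcast1, hp, hq]

-- ===== VERDICT (by name: the statement is the Claim_ definition above) =====
theorem toptal1_spec : Claim_equal_toptal1 := by
  intro X A _ _
  show toptal1 X A = toptal1_alt X A
  unfold toptal1 toptal1_alt
  cases A with
  | nil => rfl
  | cons b bs =>
    have h := loop_eq X (b :: bs) ((b :: bs).dropLast) 1 (le_refl 1)
      (by simp [Nat.add_comm]) (by simp)
    simpa [pSum, qSum, PySem.List.pyRange_zero] using h
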